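-- pv_equiv track=rewrite | github.com/chisngyen/semeval-task-11 | experiments/subtask1/exp18_bias_consistency.py | neutralize_content
-- ===== SOURCE A (Python) =====
-- def neutralize_content(text):
--     """
--     Remove plausibility cues by replacing content words with neutral symbols.
--     This creates a "bias-free" version of the syllogism.
--     """
--     # Common quantifiers and logical words to preserve
--     preserve = {'all', 'some', 'no', 'none', 'every', 'each', 'any',
--                'are', 'is', 'not', 'therefore', 'if', 'then',
--                'premise', 'conclusion', '1', '2', ':', '.', ','}
--
--     words = text.split()
--     result = []
--     symbol_map = {}
--     symbol_idx = 0
--     symbols = ['THING_A', 'THING_B', 'THING_C', 'THING_D', 'THING_E']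
--
--     for word in words:
--         word_clean = word.strip('.,!?:;()[]"\'').lower()
--
--         if word_clean in preserve or len(word_clean) <= 2 or word_clean.isdigit():
--             result.append(word)
--         else:
--             if word_clean not in symbol_map:
--                 if symbol_idx < len(symbols):
--                     symbol_map[word_clean] = symbols[symbol_idx]
--                     symbol_idx += 1
--                 else:
--                     symbol_map[word_clean] = f'THING_{symbol_idx}'
--                     symbol_idx += 1
--             result.append(symbol_map[word_clean])
--
--     return ' '.join(result)
-- ===== SOURCE B (Python) =====
-- def neutralize_content(text):
--     """Two-pass rewrite: first assign symbols to content words, then render."""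
--     preserve = {'all', 'some', 'no', 'none', 'every', 'each', 'any',
--                 'are', 'is', 'not', 'therefore', 'if', 'then',
--                 'premise', 'conclusion', '1', '2', ':', '.', ','}
--
--     def clean(w):
--         return w.strip('.,!?:;()[]"\'').lower()
--
--     def kept(c):
--         return c in preserve or len(c) <= 2 or c.isdigit()
--
--     words = text.split()
--
--     # Pass 1: build the symbol table for content words, in first-occurrence order.
--     symbol_map = {}
--     for w in words:
--         c = clean(w)
--         if not kept(c) and c not in symbol_map:
--             i = len(symbol_map)
--             symbol_map[c] = 'THING_' + ('ABCDE'[i] if i < 5 else str(i))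
--
--     # Pass 2: render.
--     return ' '.join(w if kept(clean(w)) else symbol_map[clean(w)] for w in words)
-- ===== Notes on version B (the rewrite author's own statement) =====
-- stated objective: alternative
-- what changed: Split A's single stateful loop (result list + symbol map + explicit symbol counter) into two passes: pass 1 builds the symbol table keyed by first occurrence with the symbol name computed in closed form from the table size ('ABCDE'[i] / str(i)), pass 2 renders the sentence with a generator comprehension and no counter.
import Mathlib
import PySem

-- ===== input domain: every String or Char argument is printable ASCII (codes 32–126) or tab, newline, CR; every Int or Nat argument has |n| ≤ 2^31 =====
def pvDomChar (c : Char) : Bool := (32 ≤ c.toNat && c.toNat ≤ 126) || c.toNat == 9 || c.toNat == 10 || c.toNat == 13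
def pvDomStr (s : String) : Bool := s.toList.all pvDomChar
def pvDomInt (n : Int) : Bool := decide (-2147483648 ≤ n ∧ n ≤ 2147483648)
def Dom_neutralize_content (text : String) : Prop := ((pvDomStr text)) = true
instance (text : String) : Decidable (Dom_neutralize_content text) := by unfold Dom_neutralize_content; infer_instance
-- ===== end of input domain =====

-- B replaces A's single stateful loop (result + symbol map + counter) by two passes: build the
-- symbol table first (symbol name computed from the table size), then render; same cost, alternative decomposition.

-- ===== PORT A =====
def ncPreserve : PySem.Set String :=
  PySem.Set.ofList ["all", "some", "no", "none", "every", "each", "any",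
    "are", "is", "not", "therefore", "if", "then",
    "premise", "conclusion", "1", "2", ":", ".", ","]

def ncSymbols : List String := ["THING_A", "THING_B", "THING_C", "THING_D", "THING_E"]

def ncCleanA (w : String) : String := PySem.Str.lower (PySem.Str.stripChars w ".,!?:;()[]\"'")

-- the condition of A's first branch: word_clean in preserve or len(word_clean) <= 2 or word_clean.isdigit()
def ncKeptA (c : String) : Bool :=
  PySem.Set.contains ncPreserve c || decide (PySem.Str.len c ≤ 2) || PySem.Str.strIsdigit c

-- the body of A's `for word in words` loop over the state (result, symbol_map, symbol_idx)
def ncStepA (st : List String × PySem.Dict String String × Int) (word : String) :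
    List String × PySem.Dict String String × Int :=
  if ncKeptA (ncCleanA word) then
    (st.1 ++ [word], st.2.1, st.2.2)
  else
    if ¬ st.2.1.contains (ncCleanA word) then
      if st.2.2 < PySem.List.len ncSymbols then
        (st.1 ++ [(st.2.1.insert (ncCleanA word)
            (PySem.List.pyGetD ncSymbols st.2.2 "")).getD (ncCleanA word) ""],
         st.2.1.insert (ncCleanA word) (PySem.List.pyGetD ncSymbols st.2.2 ""),
         st.2.2 + 1)
      else
        (st.1 ++ [(st.2.1.insert (ncCleanA word)
            ("THING_" ++ PySem.Int.toStr st.2.2)).getD (ncCleanA word) ""],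
         st.2.1.insert (ncCleanA word) ("THING_" ++ PySem.Int.toStr st.2.2),
         st.2.2 + 1)
    else
      (st.1 ++ [st.2.1.getD (ncCleanA word) ""], st.2.1, st.2.2)

def neutralize_content (text : String) : String :=
  PySem.Str.join " " (((PySem.Str.split₀ text).foldl ncStepA ([], PySem.Dict.empty, 0)).1)

-- ===== PORT B =====
def ncPreserveB : PySem.Set String :=
  PySem.Set.ofList ["all", "some", "no", "none", "every", "each", "any",
    "are", "is", "not", "therefore", "if", "then",
    "premise", "conclusion", "1", "2", ":", ".", ","]

def ncCleanB (w : String) : String := PySem.Str.lower (PySem.Str.stripChars w ".,!?:;()[]\"'")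

def ncKept (c : String) : Bool :=
  PySem.Set.contains ncPreserveB c || decide (PySem.Str.len c ≤ 2) || PySem.Str.strIsdigit c

-- 'THING_' + ('ABCDE'[i] if i < 5 else str(i))
def ncSymbol (i : Nat) : String :=
  "THING_" ++ (if i < 5 then (PySem.Str.pyGet? "ABCDE" (i : Int)).elim "" (fun c => String.ofList [c])
               else PySem.Int.toStr (i : Int))

-- B's pass 1: extend the symbol table by one word
def ncBuild (m : PySem.Dict String String) (w : String) : PySem.Dict String String :=
  if ncKept (ncCleanB w) || m.contains (ncCleanB w) then m
  else m.insert (ncCleanB w) (ncSymbol m.size)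

def neutralize_content_alt (text : String) : String :=
  PySem.Str.join " "
    ((PySem.Str.split₀ text).map (fun w =>
      if ncKept (ncCleanB w) then w
      else ((PySem.Str.split₀ text).foldl ncBuild PySem.Dict.empty).getD (ncCleanB w) ""))

-- ===== PRECONDITION & SPEC =====
def Spec_neutralize_content (text : String) (out : String) : Prop := out = neutralize_content_alt text
instance (text : String) (out : String) : Decidable (Spec_neutralize_content text out) := by unfold Spec_neutralize_content; infer_instance

-- ===== CLAIM (what is proved, stated in full; the proofs are below) =====
def Claim_equal_neutralize_content : Prop := ∀ (text : String), Dom_neutralize_content text → Spec_neutralize_content text (neutralize_content text)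

-- ===== LEMMAS AND PROOFS =====

theorem ncKeptA_eq (w : String) : ncKeptA (ncCleanA w) = ncKept (ncCleanB w) := rfl

theorem ncContains_build {m : PySem.Dict String String} {c : String} (h : m.contains c = true)
    (w : String) : (ncBuild m w).contains c = true := by
  unfold ncBuild
  split
  · exact h
  · simp [PySem.Dict.contains_insert, h]

theorem ncGetD_foldl_build (ws : List String) (m : PySem.Dict String String) (c : String)
    (h : m.contains c = true) : (ws.foldl ncBuild m).getD c "" = m.getD c "" := by
  induction ws generalizing m with
  | nil => rfl
  | cons w ws ih =>
    simp only [List.foldl_cons]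
    rw [ih _ (ncContains_build h w)]
    unfold ncBuild
    split
    · rfl
    · next hcond =>
      have hne : c ≠ ncCleanB w := by
        intro he; subst he
        simp [h] at hcond
      rw [PySem.Dict.getD_insert, if_neg hne]

theorem ncSymbol_small (i : Nat) (h : i < 5) :
    PySem.List.pyGetD ncSymbols (i : Int) "" = ncSymbol i := by
  interval_cases i <;> decide

set_option maxHeartbeats 1000000 in
theorem ncMain (ws : List String) (res : List String) (m : PySem.Dict String String)
    (hnd : m.keys.Nodup) :
    ws.foldl ncStepA (res, m, (m.size : Int)) =
      (res ++ ws.map (fun w =>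
          if ncKept (ncCleanB w) then w else (ws.foldl ncBuild m).getD (ncCleanB w) ""),
       ws.foldl ncBuild m, ((ws.foldl ncBuild m).size : Int)) := by
  induction ws generalizing res m with
  | nil => simp only [List.foldl_nil, List.map_nil, List.append_nil]
  | cons w ws ih =>
    rw [List.foldl_cons, List.foldl_cons, List.map_cons]
    by_cases hk : ncKept (ncCleanB w) = true
    · -- kept word: both sides leave the map alone
      have hb : ncBuild m w = m := by unfold ncBuild; simp [hk]
      have hA : ncStepA (res, m, (m.size : Int)) w = (res ++ [w], m, (m.size : Int)) := by
        unfold ncStepA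
        rw [ncKeptA_eq, if_pos hk]
      rw [hA, hb, ih _ _ hnd]
      simp [hk]
    · have hk' : ncKeptA (ncCleanA w) = false := by rw [ncKeptA_eq]; simpa using hk
      by_cases hc : m.contains (ncCleanB w) = true
      · -- content word already mapped
        have hb : ncBuild m w = m := by unfold ncBuild; simp [hc]
        have hA : ncStepA (res, m, (m.size : Int)) w
            = (res ++ [m.getD (ncCleanB w) ""], m, (m.size : Int)) := by
          unfold ncStepA
          rw [ncKeptA_eq, if_neg (by simp [hk]), if_neg (by simpa using hc)]
          rfl
        rw [hA, hb, ih _ _ hnd]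
        simp [hk, ncGetD_foldl_build ws m (ncCleanB w) hc]
      · -- fresh content word: insert with symbol number m.size
        have hcF : m.contains (ncCleanB w) = false := by simpa using hc
        have hval : ∀ h5 : Prop, ∀ _ : Decidable h5, (h5 ↔ m.size < 5) →
            (if h5 then PySem.List.pyGetD ncSymbols (m.size : Int) ""
             else "THING_" ++ PySem.Int.toStr (m.size : Int)) = ncSymbol m.size := by
          intro h5 _ hiff
          by_cases hlt : m.size < 5
          · rw [if_pos (hiff.mpr hlt)]
            exact ncSymbol_small _ hlt
          · rw [if_neg (fun hh => hlt (hiff.mp hh))]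
            unfold ncSymbol
            rw [if_neg hlt]
        have hiff : ((m.size : Int) < PySem.List.len ncSymbols) ↔ m.size < 5 := by
          simp [ncSymbols, PySem.List.len]
        set m' := m.insert (ncCleanB w) (ncSymbol m.size) with hm'
        have hb : ncBuild m w = m' := by
          unfold ncBuild; rw [if_neg (by simp [hk, hcF])]
        have hsz : (m'.size : Int) = (m.size : Int) + 1 := by
          rw [hm', PySem.Dict.size_insert, hcF]
          push_cast; ring
        have hA : ncStepA (res, m, (m.size : Int)) w
            = (res ++ [m'.getD (ncCleanB w) ""], m', (m'.size : Int)) := by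
          unfold ncStepA
          rw [ncKeptA_eq, if_neg (by simp [hk]), if_pos (by simpa using hcF)]
          rw [hsz]
          by_cases hlt : (m.size : Int) < PySem.List.len ncSymbols
          · rw [if_pos hlt]
            have := hval _ inferInstance hiff
            rw [if_pos hlt] at this
            rw [hm', this]
            rfl
          · rw [if_neg hlt]
            have := hval _ inferInstance hiff
            rw [if_neg hlt] at this
            rw [hm', this]
            rfl
        have hnd' : m'.keys.Nodup := PySem.Dict.nodup_keys_insert _ _ _ hnd
        rw [hA, hb, ih _ _ hnd']
        have hcm' : m'.contains (ncCleanB w) = true := by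
          rw [hm']; exact PySem.Dict.contains_insert_self _ _ _
        simp [hk, ncGetD_foldl_build ws m' (ncCleanB w) hcm']

-- ===== VERDICT (by name: the statement is the Claim_ definition above) =====
theorem neutralize_content_spec : Claim_equal_neutralize_content := by
  intro text _
  unfold Spec_neutralize_content neutralize_content neutralize_content_alt
  have h := ncMain (PySem.Str.split₀ text) [] PySem.Dict.empty (by decide)
  simp only [PySem.Dict.size_empty, Int.ofNat_zero] at h
  rw [h]
  rfl
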